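-- pv_equiv track=rewrite | github.com/jewoodev/coding_test | 프로그래머스/unrated/181922. 수열과 구간 쿼리 4/수열과 구간 쿼리 4.py | solution
-- ===== SOURCE A (Python) =====
-- def solution(arr, queries):
--     def veri_multi(seq, num):
--         bool_arr = []
--         for i in seq:
--             if i % num == 0:
--                 bool_arr.append(True)
--             else:
--                 bool_arr.append(False)
--         return bool_arr
--
--     for i in queries:
--             for idx, val in enumerate(veri_multi(range(i[0], i[1]+1), i[2])):
--                 if val:
--                     arr[idx] += 1
--     return arr
-- ===== SOURCE B (Python) =====
-- def solution(arr, queries):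
--     # Mutates arr in place, like the original.
--     for q in queries:
--         s, e, m = q[0], q[1], abs(q[2])
--         for j in range((-s) % m, e - s + 1, m):
--             arr[j] += 1
--     return arr
-- ===== Notes on version B (the rewrite author's own statement) =====
-- stated objective: alternative
-- what changed: Instead of scanning every element of range(q[0], q[1]+1) and testing i % k == 0, B jumps directly to the first matching offset (-q[0]) % abs(q[2]) and strides by abs(q[2]), touching only the incremented indices; Pre_ excludes queries with divisor 0, on which A returns unchanged only when the query range is empty while B's modulus always raises.
-- outside the precondition, e.g. on solution([], [[-6, -8, 0]]): A returns [], B raises ZeroDivisionError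
import Mathlib
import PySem

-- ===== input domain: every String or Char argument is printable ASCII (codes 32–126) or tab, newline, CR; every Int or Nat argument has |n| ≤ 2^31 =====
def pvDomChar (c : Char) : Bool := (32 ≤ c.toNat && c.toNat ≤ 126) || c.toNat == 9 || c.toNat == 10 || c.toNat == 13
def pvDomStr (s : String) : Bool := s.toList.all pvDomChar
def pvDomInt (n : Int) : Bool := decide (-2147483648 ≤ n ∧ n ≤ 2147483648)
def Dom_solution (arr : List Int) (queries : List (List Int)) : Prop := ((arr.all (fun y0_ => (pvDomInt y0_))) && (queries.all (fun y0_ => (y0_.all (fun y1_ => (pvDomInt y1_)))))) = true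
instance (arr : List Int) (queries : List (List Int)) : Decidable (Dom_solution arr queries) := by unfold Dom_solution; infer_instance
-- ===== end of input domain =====

-- B replaces A's element-by-element scan of range(q[0], q[1]+1) with a direct jump to the
-- first divisible offset and a stride of abs(q[2]), touching only the incremented indices;
-- both A and B mutate arr in place — the equivalence proved here is about the return value.

-- ===== PORT A =====
def veriMulti (seq : List Int) (num : Int) : List Bool :=
  seq.foldl (fun bool_arr i =>
    if PySem.Int.mod i num = 0 then bool_arr ++ [true] else bool_arr ++ [false]) []

def solution (arr : List Int) (queries : List (List Int)) : List Int :=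
  queries.foldl (fun arr i =>
    (PySem.List.enumerate
        (veriMulti (PySem.List.pyRange (PySem.List.pyGetD i 0 0)
                      (PySem.List.pyGetD i 1 0 + 1) 1)
          (PySem.List.pyGetD i 2 0)) 0).foldl
      (fun arr p => if p.2 then arr.set p.1.toNat (arr.getD p.1.toNat 0 + 1) else arr) arr) arr

-- ===== PORT B =====
def solution_alt (arr : List Int) (queries : List (List Int)) : List Int :=
  queries.foldl (fun arr q =>
    let s := PySem.List.pyGetD q 0 0
    let e := PySem.List.pyGetD q 1 0
    let m := |PySem.List.pyGetD q 2 0|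
    (PySem.List.pyRange (PySem.Int.mod (-s) m) (e - s + 1) m).foldl
      (fun arr j => arr.set j.toNat (arr.getD j.toNat 0 + 1)) arr) arr

-- ===== PRECONDITION & SPEC =====
-- Pre_ excludes: queries shorter than 3 (A raises IndexError), a write index reaching
-- past the end of arr (A raises IndexError), and queries with divisor 0 — there A raises
-- ZeroDivisionError unless the query range is empty (then it returns arr unchanged),
-- while B's modulus computation always raises.
def Pre_solution (arr : List Int) (queries : List (List Int)) : Prop :=
  ∀ q ∈ queries, 3 ≤ q.length ∧ PySem.List.pyGetD q 2 0 ≠ 0 ∧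
    (PySem.List.pyGetD q 1 0 < PySem.List.pyGetD q 0 0 ∨
      PySem.List.pyGetD q 1 0 - PySem.List.pyGetD q 0 0 <
        (arr.length : Int) +
          PySem.Int.mod (-(PySem.List.pyGetD q 0 0 + (arr.length : Int)))
            |PySem.List.pyGetD q 2 0|)
instance (arr : List Int) (queries : List (List Int)) : Decidable (Pre_solution arr queries) := by
  unfold Pre_solution; infer_instance

def pvWitness_solution : List Int × List (List Int) := ([0, 0, 0], [[0, 2, 2]])

def Spec_solution (arr : List Int) (queries : List (List Int)) (out : List Int) : Prop := out = solution_alt arr queries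
instance (arr : List Int) (queries : List (List Int)) (out : List Int) : Decidable (Spec_solution arr queries out) := by unfold Spec_solution; infer_instance

-- ===== CLAIM (what is proved, stated in full; the proofs are below) =====
def Claim_equal_solution : Prop := ∀ (arr : List Int) (queries : List (List Int)), Dom_solution arr queries → Pre_solution arr queries → Spec_solution arr queries (solution arr queries)

-- ===== LEMMAS AND PROOFS =====

theorem veriMulti_aux (seq : List Int) (num : Int) (acc : List Bool) :
    seq.foldl (fun bool_arr i =>
      if PySem.Int.mod i num = 0 then bool_arr ++ [true] else bool_arr ++ [false]) acc
      = acc ++ seq.map (fun i => decide (PySem.Int.mod i num = 0)) := by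
  induction seq generalizing acc with
  | nil => simp
  | cons x xs ih =>
    simp only [List.foldl_cons, List.map_cons]
    by_cases h : PySem.Int.mod x num = 0 <;> simp [h, ih]

theorem veriMulti_eq_map (seq : List Int) (num : Int) :
    veriMulti seq num = seq.map (fun i => decide (PySem.Int.mod i num = 0)) := by
  simpa using veriMulti_aux seq num []

theorem enumerate_map {α β : Type} (f : α → β) (xs : List α) (c : Int) :
    PySem.List.enumerate (xs.map f) c
      = (PySem.List.enumerate xs c).map (fun p => (p.1, f p.2)) := by
  induction xs generalizing c with
  | nil => simp [PySem.List.enumerate_nil]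
  | cons x xs ih => simp [PySem.List.enumerate_cons, ih]

theorem pv_eq_of_pairwise_lt {l1 l2 : List Int}
    (h1 : l1.Pairwise (· < ·)) (h2 : l2.Pairwise (· < ·))
    (h : ∀ x, x ∈ l1 ↔ x ∈ l2) : l1 = l2 := by
  induction l1 generalizing l2 with
  | nil =>
    cases l2 with
    | nil => rfl
    | cons b t2 => exact absurd ((h b).2 List.mem_cons_self) (List.not_mem_nil)
  | cons a t1 ih =>
    cases l2 with
    | nil => exact absurd ((h a).1 List.mem_cons_self) (List.not_mem_nil)
    | cons b t2 =>
      have hab : a = b := by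
        rcases List.mem_cons.1 ((h a).1 List.mem_cons_self) with h' | h'
        · exact h'
        · rcases List.mem_cons.1 ((h b).2 List.mem_cons_self) with h'' | h''
          · exact h''.symm
          · have hba : b < a := (List.pairwise_cons.1 h2).1 a h'
            have hab : a < b := (List.pairwise_cons.1 h1).1 b h''
            omega
      subst hab
      have ht : ∀ x, x ∈ t1 ↔ x ∈ t2 := by
        intro x
        constructor
        · intro hx
          have hax : a < x := (List.pairwise_cons.1 h1).1 x hx
          rcases List.mem_cons.1 ((h x).1 (List.mem_cons_of_mem _ hx)) with h' | h'
          · omega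
          · exact h'
        · intro hx
          have hax : a < x := (List.pairwise_cons.1 h2).1 x hx
          rcases List.mem_cons.1 ((h x).2 (List.mem_cons_of_mem _ hx)) with h' | h'
          · omega
          · exact h'
      exact congrArg (a :: ·) (ih (List.pairwise_cons.1 h1).2 (List.pairwise_cons.1 h2).2 ht)

theorem pairwise_lt_pyRange_pos (a b s : Int) (hs : 0 < s) :
    (PySem.List.pyRange a b s).Pairwise (· < ·) := by
  rw [PySem.List.pyRange_of_pos a b hs]
  refine List.Pairwise.map _ ?_ (List.pairwise_lt_range)
  intro k1 k2 hk
  have : (s : Int) * k1 < s * k2 := by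
    apply mul_lt_mul_of_pos_left _ hs
    exact_mod_cast hk
  omega

-- the arithmetic core: the divisible offsets of A's scanned range ARE B's stride range
theorem filter_eq_stride (s e k : Int) (hk : k ≠ 0) :
    (PySem.List.pyRange 0 ((PySem.List.pyRange s (e + 1) 1).length : Int) 1).filter
        (fun j => decide (PySem.Int.mod (s + j) k = 0))
      = PySem.List.pyRange (PySem.Int.mod (-s) |k|) (e - s + 1) |k| := by
  have hm : (0 : Int) < |k| := abs_pos.2 hk
  have hmod : PySem.Int.mod (-s) |k| = (-s) % |k| := PySem.Int.mod_eq_emod_of_pos hm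
  have hr0 : 0 ≤ (-s) % |k| := Int.emod_nonneg _ (by omega)
  have hrm : (-s) % |k| < |k| := Int.emod_lt_of_pos _ hm
  have hdr : |k| ∣ (-s - (-s) % |k|) := ⟨(-s) / |k|, by rw [Int.emod_def]; ring⟩
  have hlen : ((PySem.List.pyRange s (e + 1) 1).length : Int) = max (e + 1 - s) 0 := by
    rw [PySem.List.pyRange_one]
    simp
  apply pv_eq_of_pairwise_lt
  · exact List.Pairwise.filter _ (PySem.List.pairwise_lt_pyRange_one 0 _)
  · exact pairwise_lt_pyRange_pos _ _ _ hm
  · intro x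
    rw [List.mem_filter, PySem.List.mem_pyRange_one,
      PySem.List.mem_pyRange_iff_of_pos hm, hmod]
    simp only [decide_eq_true_eq, PySem.Int.mod_eq_zero_iff_dvd]
    constructor
    · rintro ⟨⟨hx0, hxN⟩, hdvd⟩
      have hdvd' : |k| ∣ s + x := (abs_dvd _ _).2 hdvd
      have hdx : |k| ∣ x - (-s) % |k| := by
        have heq : x - (-s) % |k| = (s + x) + (-s - (-s) % |k|) := by ring
        rw [heq]; exact dvd_add hdvd' hdr
      refine ⟨?_, by omega, hdx⟩
      rcases hdx with ⟨t, ht⟩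
      by_cases h0 : 0 ≤ t
      · nlinarith
      · have h1 : t ≤ -1 := by omega
        nlinarith
    · rintro ⟨hrx, hxe, hdx⟩
      have hdvd' : |k| ∣ s + x := by
        have heq : s + x = (x - (-s) % |k|) - (-s - (-s) % |k|) := by ring
        rw [heq]; exact dvd_sub hdx hdr
      exact ⟨⟨by omega, by omega⟩, (abs_dvd _ _).1 hdvd'⟩

-- one query, divisor ≠ 0: A's enumerate-and-test pass equals B's stride pass
theorem step_eq (arr : List Int) (s e k : Int) (hk : k ≠ 0) :
    (PySem.List.enumerate (veriMulti (PySem.List.pyRange s (e + 1) 1) k) 0).foldl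
        (fun a p => if p.2 then a.set p.1.toNat (a.getD p.1.toNat 0 + 1) else a) arr
      = (PySem.List.pyRange (PySem.Int.mod (-s) |k|) (e - s + 1) |k|).foldl
          (fun a j => a.set j.toNat (a.getD j.toNat 0 + 1)) arr := by
  rw [veriMulti_eq_map, enumerate_map, List.foldl_map,
    PySem.List.enumerate_eq_map_pyRange _ (0 : Int), List.foldl_map]
  have hlen : PySem.List.len (PySem.List.pyRange s (e + 1) 1)
      = ((PySem.List.pyRange s (e + 1) 1).length : Int) := by
    simp [PySem.List.len]
  rw [hlen]
  refine Eq.trans (PySem.List.foldl_congr_mem _ _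
    (fun a (j : Int) => if decide (PySem.Int.mod (s + j) k = 0) = true
      then a.set j.toNat (a.getD j.toNat 0 + 1) else a) arr ?_) ?_
  · intro acc j hj
    have hj' := PySem.List.mem_pyRange_one.1 hj
    have hget : PySem.List.pyGetD (PySem.List.pyRange s (e + 1) 1) j 0 = s + j := by
      rw [PySem.List.pyGetD_eq_getElem _ _ hj'.1 hj'.2,
        PySem.List.getElem_pyRange_one]
      omega
    simp [hget]
  · rw [← List.foldl_filter, filter_eq_stride s e k hk]

theorem main_eq (queries : List (List Int)) :
    ∀ arr : List Int, (∀ q ∈ queries, PySem.List.pyGetD q 2 0 ≠ 0) →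
      solution arr queries = solution_alt arr queries := by
  induction queries with
  | nil => intro arr _; rfl
  | cons q qs ih =>
    intro arr h
    simp only [solution, solution_alt, List.foldl_cons]
    rw [step_eq arr (PySem.List.pyGetD q 0 0) (PySem.List.pyGetD q 1 0)
      (PySem.List.pyGetD q 2 0) (h q List.mem_cons_self)]
    exact ih _ (fun q' hq' => h q' (List.mem_cons_of_mem _ hq'))

-- ===== VERDICT (by name: the statement is the Claim_ definition above) =====
theorem solution_spec : Claim_equal_solution := by
  intro arr queries _ hpre
  unfold Spec_solution
  exact main_eq queries arr (fun q hq => (hpre q hq).2.1)
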